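-- pv_equiv track=rewrite | github.com/AzizAlqasem/StrongFieldPhysics | StrongFieldPhysics/spectroscopy/energy_levels.py | parse_energy_levels
-- ===== SOURCE A (Python) =====
-- def parse_energy_levels(data:str, species:str):
--     """ example data:
--     Configuration	Term	J	Prefix	Level (eV)	Suffix	Uncertainty (eV)	Reference
--     "5p6.6s"	"2S"	"1/2"	""	"0.00000000"	""	""	"L15024"
--     "5p6.6p"	"2P*"	"1/2"	""	"1.385928617528"	""	"0.000000000010"	"L12151"
--     "5p6.6p"	"2P*"	"3/2"	""	"1.454620692074"	""	"0.000000000025"	"L15527"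
--     ...
--     """
--     data = data.split('\n')
--     data_dict = {key: [] for key in data[0].split('\t')}
--     for i, line in enumerate(data[1:]):
--         if line.startswith('"' + species):
--             # last_line_i = i
--             break
--         line = line.split('\t')
--         for key, value in zip(data_dict.keys(), line):
--             data_dict[key].append(value.replace('"', ''))
--     return data_dict
-- ===== SOURCE B (Python) =====
-- def parse_energy_levels(data: str, species: str):
--     lines = data.split('\n')
--     keys = list(dict.fromkeys(lines[0].split('\t')))
--     rows = []
--     for line in lines[1:]:
--         if line.startswith('"' + species):
--             break
--         rows.append(line.split('\t'))
--     return {k: [r[j].replace('"', '') for r in rows if len(r) > j]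
--             for j, k in enumerate(keys)}
-- ===== Notes on version B (the rewrite author's own statement) =====
-- stated objective: alternative
-- what changed: Instead of interleaving row scanning with per-key appends into a mutable dict, B first collects the kept rows (up to the break line) as split field lists and then builds each column independently by projecting index j from every row long enough, assembling the dict in one comprehension.
import Mathlib
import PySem

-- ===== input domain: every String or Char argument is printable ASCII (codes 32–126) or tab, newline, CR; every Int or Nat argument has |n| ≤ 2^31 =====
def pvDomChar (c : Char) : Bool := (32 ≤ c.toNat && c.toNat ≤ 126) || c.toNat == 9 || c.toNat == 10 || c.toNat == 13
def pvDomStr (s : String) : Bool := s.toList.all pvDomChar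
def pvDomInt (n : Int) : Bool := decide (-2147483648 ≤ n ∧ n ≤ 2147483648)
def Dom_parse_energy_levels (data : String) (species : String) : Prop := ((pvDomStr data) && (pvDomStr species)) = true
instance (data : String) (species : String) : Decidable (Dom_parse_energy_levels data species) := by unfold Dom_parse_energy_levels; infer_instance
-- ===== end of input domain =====

-- B builds the result column-by-column from the pre-collected rows instead of A's row-wise
-- appends into a mutable dict; same asymptotic cost, different decomposition.

-- ===== PORT A =====
-- value.replace('"', '') as a String (strings handled as List Char via PySem.Chars)
def pvStrip (cs : List Char) : String := String.ofList (PySem.Chars.replace cs ['"'] [])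

-- the 'for i, line in enumerate(data[1:]): if line.startswith(…): break; … appends' loop
def pvLoopA (species : String) : List (List Char) → PySem.Dict String (List String) → PySem.Dict String (List String)
  | [], d => d
  | line :: rest, d =>
    if PySem.Chars.startswith line ('"' :: species.toList) then d
    else
      pvLoopA species rest
        (((PySem.Dict.keys d).zip (PySem.Chars.splitOn line ['\t'])).foldl
          (fun d kv => d.modify kv.1 [] (· ++ [pvStrip kv.2])) d)

def parse_energy_levels (data : String) (species : String) : List (String × List String) :=
  match PySem.Chars.splitOn data.toList ['\n'] with
  | [] => []   -- unreachable: str.split never returns an empty list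
  | l0 :: rest =>
    let header : List String := (PySem.Chars.splitOn l0 ['\t']).map (fun cs => String.ofList cs)
    let d0 : PySem.Dict String (List String) :=
      header.foldl (fun d k => d.insert k []) PySem.Dict.empty
    (pvLoopA species rest d0).items

-- ===== PORT B =====
-- collect the kept rows (split into fields) up to the break line
def pvRowsB (species : String) : List (List Char) → List (List (List Char))
  | [] => []
  | line :: rest =>
    if PySem.Chars.startswith line ('"' :: species.toList) then []
    else PySem.Chars.splitOn line ['\t'] :: pvRowsB species rest

def parse_energy_levels_alt (data : String) (species : String) : List (String × List String) :=
  match PySem.Chars.splitOn data.toList ['\n'] with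
  | [] => []   -- unreachable: str.split never returns an empty list
  | l0 :: rest =>
    let keys : List String :=
      PySem.List.dedup ((PySem.Chars.splitOn l0 ['\t']).map (fun cs => String.ofList cs))
    let rows := pvRowsB species rest
    keys.zipIdx.map (fun kj =>
      (kj.1, (rows.filter (fun r => decide (kj.2 < r.length))).map
        (fun r => pvStrip (r.getD kj.2 []))))

-- ===== PRECONDITION & SPEC =====
def Spec_parse_energy_levels (data : String) (species : String) (out : List (String × List String)) : Prop := out = parse_energy_levels_alt data species
instance (data : String) (species : String) (out : List (String × List String)) : Decidable (Spec_parse_energy_levels data species out) := by unfold Spec_parse_energy_levels; infer_instance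

-- ===== CLAIM (what is proved, stated in full; the proofs are below) =====
def Claim_equal_parse_energy_levels : Prop := ∀ (data : String) (species : String), Dom_parse_energy_levels data species → Spec_parse_energy_levels data species (parse_energy_levels data species)

-- ===== LEMMAS AND PROOFS =====

-- one row step of A's loop
def pvStep (d : PySem.Dict String (List String)) (r : List (List Char)) : PySem.Dict String (List String) :=
  ((PySem.Dict.keys d).zip r).foldl
    (fun d kv => d.modify kv.1 [] (· ++ [pvStrip kv.2])) d

theorem pvLoopA_eq_foldl_rows (species : String) (ls : List (List Char))
    (d : PySem.Dict String (List String)) :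
    pvLoopA species ls d = (pvRowsB species ls).foldl pvStep d := by
  induction ls generalizing d with
  | nil => rfl
  | cons line rest ih =>
    simp only [pvLoopA, pvRowsB]
    split_ifs with h
    · rfl
    · simp [ih, pvStep]

theorem pvStep_keys (d : PySem.Dict String (List String)) (r : List (List Char)) :
    (pvStep d r).keys = d.keys := by
  have h1 : (pvStep d r).keys
      = PySem.Set.update d.keys (((PySem.Dict.keys d).zip r).map (·.1)) :=
    PySem.Dict.keys_foldl_modify_key (((PySem.Dict.keys d).zip r)) (fun kv => kv.1) []
      (fun _ kv v => v ++ [pvStrip kv.2]) d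
  have h0 : (PySem.Set.ofList (((PySem.Dict.keys d).zip r).map (·.1))).filter
      (fun y => !(PySem.Set.contains d.keys y)) = [] := by
    rw [List.filter_eq_nil_iff]
    intro a ha
    obtain ⟨p, hp, rfl⟩ := List.mem_map.1 ((PySem.Set.mem_ofList _ _).1 ha)
    obtain ⟨x, y⟩ := p
    have hmem : x ∈ d.keys := (List.of_mem_zip hp).1
    simpa using hmem
  rw [h1, PySem.Set.update_eq_append_filter, h0, List.append_nil]

theorem pvFoldl_step_keys (rows : List (List (List Char))) (d : PySem.Dict String (List String)) :
    (rows.foldl pvStep d).keys = d.keys := by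
  induction rows generalizing d with
  | nil => rfl
  | cons r rows ih => simp [ih, pvStep_keys]

-- the zipped-keys filter at a nodup key list picks exactly position j
theorem pvFilter_zip_nodup (K : List String) (r : List (List Char)) (j : Nat)
    (hnd : K.Nodup) (hj : j < K.length) :
    (K.zip r).filter (fun kv => kv.1 == K[j]) =
      if h : j < r.length then [(K[j], r[j])] else [] := by
  induction K generalizing r j with
  | nil => simp at hj
  | cons k K ih =>
    cases r with
    | nil => simp
    | cons x r =>
      cases j with
      | zero =>
        have hk : k ∉ K := (List.nodup_cons.1 hnd).1
        simp only [List.zip_cons_cons, List.filter_cons, List.getElem_cons_zero]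
        have h0 : (K.zip r).filter (fun kv => kv.1 == k) = [] := by
          rw [List.filter_eq_nil_iff]
          intro p hp
          have hmem := (List.of_mem_zip hp).1
          simp only [beq_iff_eq]
          intro h; exact hk (h ▸ hmem)
        simp [h0]
      | succ j =>
        have hnd' : K.Nodup := (List.nodup_cons.1 hnd).2
        have hj' : j < K.length := by simpa using hj
        have hkj : K[j] ∈ K := List.getElem_mem _
        have hne : k ≠ K[j] := fun h => (List.nodup_cons.1 hnd).1 (h ▸ hkj)
        simp only [List.zip_cons_cons, List.filter_cons, List.getElem_cons_succ]
        rw [ih r j hnd' hj']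
        simp only [beq_iff_eq, hne, if_false]
        split_ifs with h1 h2 <;> (simp_all; try omega)

theorem pvStep_getD (d : PySem.Dict String (List String)) (r : List (List Char)) (j : Nat)
    (K : List String) (hkeys : d.keys = K) (hnd : K.Nodup) (hj : j < K.length) :
    (pvStep d r).getD K[j] [] =
      d.getD K[j] [] ++
        (if j < r.length then [pvStrip (r.getD j [])] else []) := by
  subst hkeys
  unfold pvStep
  have hmap : ((PySem.Dict.keys d).zip r).foldl
      (fun d kv => d.modify kv.1 [] (· ++ [pvStrip kv.2])) d
      = ((((PySem.Dict.keys d).zip r).map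
          (fun kv => (kv.1, pvStrip kv.2))).foldl
          (fun d p => d.modify p.1 [] (· ++ [p.2])) d) := by
    rw [List.foldl_map]
  rw [hmap, PySem.Dict.getD_foldl_modify_append]
  congr 1
  rw [List.filter_map]
  have hcomp : ((fun p : String × String => p.1 == d.keys[j]) ∘
      (fun kv : String × List Char => (kv.1, pvStrip kv.2)))
      = (fun kv : String × List Char => kv.1 == d.keys[j]) := rfl
  rw [hcomp, pvFilter_zip_nodup d.keys r j hnd hj]
  split_ifs with h
  · simp [List.getD_eq_getElem?_getD, List.getElem?_eq_getElem h]
  · simp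

theorem pvFoldl_step_getD (rows : List (List (List Char))) (d : PySem.Dict String (List String))
    (j : Nat) (K : List String) (hkeys : d.keys = K) (hnd : K.Nodup) (hj : j < K.length) :
    (rows.foldl pvStep d).getD K[j] [] =
      d.getD K[j] [] ++
        (rows.filter (fun r => decide (j < r.length))).map
          (fun r => pvStrip (r.getD j [])) := by
  induction rows generalizing d with
  | nil => simp
  | cons r rows ih =>
    simp only [List.foldl_cons, List.filter_cons]
    have hk : (pvStep d r).keys = K := (pvStep_keys d r).trans hkeys
    have hrec := ih (pvStep d r) hk
    rw [hrec, pvStep_getD d r j K hkeys hnd hj]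
    by_cases h : j < r.length
    · simp [h]
    · simp [h]

-- the initial dict from the header: all values []
theorem pvInit_getD (hs : List String) (d : PySem.Dict String (List String))
    (h : ∀ k, d.getD k [] = []) (k : String) :
    (hs.foldl (fun d k => d.insert k []) d).getD k [] = [] := by
  induction hs generalizing d with
  | nil => exact h k
  | cons x hs ih =>
    simp only [List.foldl_cons]
    refine ih _ (fun k' => ?_)
    rw [PySem.Dict.getD_insert]
    split_ifs with hx
    · rfl
    · exact h k'

theorem pvInit_keys (hs : List String) :
    (hs.foldl (fun d k => d.insert k ([] : List String)) PySem.Dict.empty).keys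
      = PySem.List.dedup hs := by
  rw [PySem.Dict.keys_foldl_insert hs (fun _ _ => []) PySem.Dict.empty]
  simp [PySem.Dict.keys_empty, PySem.Set.update_nil_left, PySem.List.dedup_eq_ofList]

-- ===== VERDICT (by name: the statement is the Claim_ definition above) =====
theorem parse_energy_levels_spec : Claim_equal_parse_energy_levels := by
  intro data species _
  unfold Spec_parse_energy_levels parse_energy_levels parse_energy_levels_alt
  cases hsp : PySem.Chars.splitOn data.toList ['\n'] with
  | nil => rfl
  | cons l0 rest =>
    simp only
    set K : List String :=
      PySem.List.dedup ((PySem.Chars.splitOn l0 ['\t']).map (fun cs => String.ofList cs)) with hK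
    set d0 : PySem.Dict String (List String) :=
      ((PySem.Chars.splitOn l0 ['\t']).map (fun cs => String.ofList cs)).foldl
        (fun d k => d.insert k []) PySem.Dict.empty with hd0
    set rows := pvRowsB species rest with hrows
    have hkeys0 : d0.keys = K := pvInit_keys _
    have hndK : K.Nodup := by
      rw [hK, PySem.List.dedup_eq_ofList]; exact PySem.Set.nodup_ofList _
    rw [pvLoopA_eq_foldl_rows]
    set D := rows.foldl pvStep d0 with hD
    have hkeysD : D.keys = K := by rw [hD, pvFoldl_step_keys, hkeys0]
    have hndD : D.keys.Nodup := hkeysD ▸ hndK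
    rw [PySem.Dict.items_eq_map_keys D hndD ([] : List String), hkeysD]
    apply List.ext_getElem
    · simp
    · intro j h1 h2
      have hjK : j < K.length := by simpa using h1
      have hget : D.getD K[j] [] =
          (rows.filter (fun r => decide (j < r.length))).map
            (fun r => pvStrip (r.getD j [])) := by
        have hfold := pvFoldl_step_getD rows d0 j K hkeys0 hndK hjK
        rw [hD, hfold, pvInit_getD _ _ (fun k => PySem.Dict.getD_empty k []) K[j]]
        simp
      simp [hget]
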